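-- pv_equiv track=rewrite | github.com/mtur2007/SetPrint | Development_files/update_0_3_d/demo_setprint_0_3_0.py | check_matching_elements
-- ===== SOURCE A (Python) =====
-- def check_matching_elements(mapping_point, collection_index):
--
--     max_match_count = 0  # 最大連続一致数
--     max_match_index = -1  # 最大連続一致数を持つ1次元目のインデックス
--
--     collection_len = len(collection_index)
--
--     for row_index, row in enumerate(mapping_point):
--         current_match_count = 0  # 現在の行での連続一致数
--         if collection_len >= len(row):
--             for i, elem in enumerate(row):
--                 if i < len(collection_index) and elem == collection_index[i]:
--                     current_match_count += 1  # 一致した場合カウントを増やす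
--                 else:
--                     break  # 一致が途切れたら終了
--
--             # 最大連続一致数を更新
--             if (len(row) == current_match_count) and (current_match_count > max_match_count):
--                 max_match_count = current_match_count
--                 max_match_index = row_index
--
--     return max_match_index  # 最大連続一致数を持つ行のインデックス
-- ===== SOURCE B (Python) =====
-- def check_matching_elements(mapping_point, collection_index):
--     first = {}
--     for i, row in enumerate(mapping_point):
--         t = tuple(row)
--         if t not in first:
--             first[t] = i
--     n = len(collection_index)
--     for k in sorted({len(row) for row in mapping_point}, reverse=True):
--         if 0 < k <= n:
--             key = tuple(collection_index[:k])
--             if key in first: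
--                 return first[key]
--     return -1
-- ===== Notes on version B (the rewrite author's own statement) =====
-- stated objective: alternative
-- what changed: Replaces the per-row prefix-counting scan with a dict from row-tuple to earliest index built once, then probes the distinct row lengths from longest to shortest against the corresponding prefix of collection_index and returns the stored index on the first hit.
import Mathlib
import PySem

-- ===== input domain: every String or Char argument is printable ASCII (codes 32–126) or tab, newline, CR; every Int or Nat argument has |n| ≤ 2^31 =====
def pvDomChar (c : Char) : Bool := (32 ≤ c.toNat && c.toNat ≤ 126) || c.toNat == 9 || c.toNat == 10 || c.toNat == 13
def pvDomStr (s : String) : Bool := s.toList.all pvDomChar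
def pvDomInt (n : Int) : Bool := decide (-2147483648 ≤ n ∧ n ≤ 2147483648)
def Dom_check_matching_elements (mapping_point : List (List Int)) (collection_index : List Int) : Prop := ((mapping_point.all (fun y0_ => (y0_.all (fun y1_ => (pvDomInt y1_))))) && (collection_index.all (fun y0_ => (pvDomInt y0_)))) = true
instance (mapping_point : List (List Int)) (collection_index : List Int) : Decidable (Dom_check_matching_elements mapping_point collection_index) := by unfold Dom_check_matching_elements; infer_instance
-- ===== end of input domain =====

-- B replaces A's per-row prefix-counting scan by an earliest-index dict over rows
-- plus longest-to-shortest prefix probing; equal return value proved on all inputs.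


-- ===== PORT A =====
-- inner loop 'for i, elem in enumerate(row): if i < len(collection_index) and elem == collection_index[i]: count += 1 else: break'
-- (the 'i < len(ci)' guard makes ci[i] in range, so ci.getD i 0 is exactly Python's ci[i] there)
def cmeCount (ci : List Int) : List Int → Nat → Nat
  | [], _ => 0
  | e :: rest, i =>
    if i < ci.length ∧ ci.getD i 0 = e then cmeCount ci rest (i + 1) + 1 else 0

-- outer 'for row_index, row in enumerate(mapping_point)' loop carrying (max_match_count, max_match_index)
def cmeLoop (ci : List Int) : List (List Int) → Nat → Int → Int → Int
  | [], _, _, mmi => mmi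
  | row :: rest, ri, mmc, mmi =>
    if ci.length ≥ row.length then
      let cmc := cmeCount ci row 0
      if row.length = cmc ∧ (cmc : Int) > mmc then cmeLoop ci rest (ri + 1) (cmc : Int) (ri : Int)
      else cmeLoop ci rest (ri + 1) mmc mmi
    else cmeLoop ci rest (ri + 1) mmc mmi

def check_matching_elements (mapping_point : List (List Int)) (collection_index : List Int) : Int :=
  cmeLoop collection_index mapping_point 0 0 (-1)

-- ===== PORT B =====
-- 'for i, row in enumerate(mapping_point): if tuple(row) not in first: first[tuple(row)] = i'
def cmeBuild : List (List Int) → Nat → PySem.Dict (List Int) Int → PySem.Dict (List Int) Int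
  | [], _, d => d
  | row :: rest, i, d =>
    cmeBuild rest (i + 1) (if (d.get? row).isSome then d else d.insert row (i : Int))

-- 'sorted({len(row) for row in mapping_point}, reverse=True)': the distinct row lengths, longest first
def cmeLens (mapping_point : List (List Int)) : List Nat :=
  PySem.List.sorted (PySem.Set.ofList (mapping_point.map List.length)) (fun x => x) true

-- 'for k in sorted(...): if 0 < k <= n: key = tuple(collection_index[:k]); if key in first: return first[key]'
def cmeProbe (d : PySem.Dict (List Int) Int) (ci : List Int) (n : Nat) : List Nat → Int
  | [] => -1
  | k :: rest =>
    if 0 < k ∧ k ≤ n then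
      match d.get? (ci.take k) with
      | some v => v
      | none => cmeProbe d ci n rest
    else cmeProbe d ci n rest

def check_matching_elements_alt (mapping_point : List (List Int)) (collection_index : List Int) : Int :=
  cmeProbe (cmeBuild mapping_point 0 PySem.Dict.empty) collection_index collection_index.length
    (cmeLens mapping_point)

-- ===== PRECONDITION & SPEC =====
def Spec_check_matching_elements (mapping_point : List (List Int)) (collection_index : List Int) (out : Int) : Prop := out = check_matching_elements_alt mapping_point collection_index
instance (mapping_point : List (List Int)) (collection_index : List Int) (out : Int) : Decidable (Spec_check_matching_elements mapping_point collection_index out) := by unfold Spec_check_matching_elements; infer_instance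

-- ===== CLAIM (what is proved, stated in full; the proofs are below) =====
def Claim_equal_check_matching_elements : Prop := ∀ (mapping_point : List (List Int)) (collection_index : List Int), Dom_check_matching_elements mapping_point collection_index → Spec_check_matching_elements mapping_point collection_index (check_matching_elements mapping_point collection_index)

-- ===== LEMMAS AND PROOFS =====

-- the largest k with m < k ≤ ci.length such that ci.take k occurs as a row (0 if none)
abbrev cmeG (ci : List Int) (mp : List (List Int)) (m : Nat) : Nat :=
  Nat.findGreatest (fun k => m < k ∧ ci.take k ∈ mp) ci.length

lemma fg_eq {P : ℕ → Prop} [DecidablePred P] {b g : ℕ} (hg : P g) (hb : g ≤ b)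
    (hmax : ∀ k, g < k → k ≤ b → ¬ P k) : Nat.findGreatest P b = g :=
  Nat.findGreatest_eq_iff.mpr ⟨hb, fun _ => hg, hmax⟩

-- the inner counting loop reaches the full row length iff row is a prefix of ci.drop i
lemma cmeCount_iff (ci : List Int) : ∀ (row : List Int) (i : Nat), i + row.length ≤ ci.length →
    (cmeCount ci row i = row.length ↔ row <+: ci.drop i) := by
  intro row
  induction row with
  | nil => intro i _; simp [cmeCount]
  | cons e rest ih =>
    intro i h
    have hi : i < ci.length := by simp at h; omega
    have hdrop : ci.drop i = ci[i] :: ci.drop (i + 1) := List.drop_eq_getElem_cons hi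
    rw [hdrop, List.cons_prefix_cons]
    by_cases he : ci.getD i 0 = e
    · have he' : e = ci[i] := by rw [← he, List.getD_eq_getElem ci 0 hi]
      have h' : (i + 1) + rest.length ≤ ci.length := by simp at h ⊢; omega
      simp only [cmeCount, List.length_cons]
      rw [if_pos (show i < ci.length ∧ ci.getD i 0 = e from ⟨hi, he⟩)]
      constructor
      · intro hc; exact ⟨he', (ih (i + 1) h').mp (by omega)⟩
      · rintro ⟨_, hc⟩; have := (ih (i + 1) h').mpr hc; omega
    · have he' : ¬ (e = ci[i]) := by
        intro hee; exact he (by rw [List.getD_eq_getElem ci 0 hi, ← hee])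
      simp only [cmeCount, if_neg (by tauto : ¬ (i < ci.length ∧ ci.getD i 0 = e)), List.length_cons]
      constructor
      · intro hc; omega
      · intro hc; exact absurd hc.1 he'

-- with no candidate longer than the running maximum m, the loop never updates mmi
lemma cmeLoop_neg (ci : List Int) : ∀ (mp : List (List Int)) (ri m : Nat) (mmi : Int),
    (∀ k, m < k → k ≤ ci.length → ci.take k ∉ mp) →
    cmeLoop ci mp ri (m : Int) mmi = mmi := by
  intro mp
  induction mp with
  | nil => intro ri m mmi _; simp [cmeLoop]
  | cons row rest ih =>
    intro ri m mmi h
    have hrest : ∀ k, m < k → k ≤ ci.length → ci.take k ∉ rest := by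
      intro k h1 h2 hk; exact h k h1 h2 (List.mem_cons_of_mem _ hk)
    simp only [cmeLoop]
    by_cases g : ci.length ≥ row.length
    · rw [if_pos g]
      have hcond : ¬ (row.length = cmeCount ci row 0 ∧ ((cmeCount ci row 0 : Int)) > (m : Int)) := by
        rintro ⟨h1, h2⟩
        have hpre : row <+: ci := by
          have := (cmeCount_iff ci row 0 (by simpa using g)).mp h1.symm
          simpa using this
        have hlen : m < row.length := by
          have : ((row.length : Int)) > (m : Int) := by rw [h1]; exact h2
          exact_mod_cast this
        have hmem : ci.take row.length ∈ row :: rest := by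
          rw [← List.prefix_iff_eq_take.mp hpre]
          exact List.mem_cons_self
        exact h row.length hlen g hmem
      rw [if_neg hcond]
      exact ih (ri + 1) m mmi hrest
    · rw [if_neg g]
      exact ih (ri + 1) m mmi hrest

-- with a candidate longer than m present, the loop returns the index of the first row
-- equal to the longest matching prefix
lemma cmeLoop_pos (ci : List Int) : ∀ (mp : List (List Int)) (ri m : Nat) (mmi : Int),
    (∃ k, m < k ∧ k ≤ ci.length ∧ ci.take k ∈ mp) →
    cmeLoop ci mp ri (m : Int) mmi
      = (((ri + mp.findIdx (· == ci.take (cmeG ci mp m))) : Nat) : Int) := by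
  intro mp
  induction mp with
  | nil => rintro ri m mmi ⟨k, _, _, hk⟩; simp at hk
  | cons row rest ih =>
    intro ri m mmi H
    by_cases hrow : row <+: ci ∧ m < row.length
    · obtain ⟨hpre, hlen⟩ := hrow
      have hrl : row.length ≤ ci.length := hpre.length_le
      have hc : cmeCount ci row 0 = row.length := by
        rw [cmeCount_iff ci row 0 (by omega)]
        simpa using hpre
      have hrtake : ci.take row.length = row := (List.prefix_iff_eq_take.mp hpre).symm
      simp only [cmeLoop]
      rw [if_pos (show ci.length ≥ row.length from hrl), hc]
      rw [if_pos (show row.length = row.length ∧ ((row.length : Int)) > (m : Int) from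
        ⟨rfl, by exact_mod_cast hlen⟩)]
      by_cases hrest : ∃ k, row.length < k ∧ k ≤ ci.length ∧ ci.take k ∈ rest
      · rw [ih (ri + 1) row.length (ri : Int) hrest]
        have hGne : cmeG ci rest row.length ≠ 0 := by
          obtain ⟨k, h1, h2, h3⟩ := hrest
          have : k ≤ cmeG ci rest row.length := Nat.le_findGreatest h2 ⟨h1, h3⟩
          omega
        have hPG : row.length < cmeG ci rest row.length ∧ ci.take (cmeG ci rest row.length) ∈ rest :=
          Nat.findGreatest_of_ne_zero rfl hGne
        have hGle : cmeG ci rest row.length ≤ ci.length := Nat.findGreatest_le ci.length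
        have hGfull : cmeG ci (row :: rest) m = cmeG ci rest row.length := by
          apply fg_eq
          · exact ⟨by omega, List.mem_cons_of_mem _ hPG.2⟩
          · exact hGle
          · rintro k hk1 hk2 ⟨hk3, hk4⟩
            rcases List.mem_cons.mp hk4 with hEq | hMem
            · have hl : (ci.take k).length = k := List.length_take_of_le hk2
              rw [hEq] at hl
              omega
            · exact Nat.findGreatest_is_greatest (show cmeG ci rest row.length < k by omega) hk2
                ⟨by omega, hMem⟩
        rw [hGfull]
        have hne : (row == ci.take (cmeG ci rest row.length)) = false := by
          rw [beq_eq_false_iff_ne]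
          intro hEq
          have := List.length_take_of_le hGle
          rw [← hEq] at this
          omega
        rw [List.findIdx_cons, hne]
        simp only [cond_false]
        push_cast
        ring
      · push Not at hrest
        rw [cmeLoop_neg ci rest (ri + 1) row.length (ri : Int) hrest]
        have hGfull : cmeG ci (row :: rest) m = row.length := by
          apply fg_eq
          · refine ⟨hlen, ?_⟩
            rw [hrtake]
            exact List.mem_cons_self
          · exact hrl
          · rintro k hk1 hk2 ⟨hk3, hk4⟩
            rcases List.mem_cons.mp hk4 with hEq | hMem
            · have hl : (ci.take k).length = k := List.length_take_of_le hk2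
              rw [hEq] at hl
              omega
            · exact hrest k hk1 hk2 hMem
        rw [hGfull]
        have hbeq : (row == ci.take row.length) = true := by
          rw [hrtake]
          simp
        rw [List.findIdx_cons, hbeq]
        simp
    · have Hrest : ∃ k, m < k ∧ k ≤ ci.length ∧ ci.take k ∈ rest := by
        obtain ⟨k, h1, h2, h3⟩ := H
        rcases List.mem_cons.mp h3 with hEq | hMem
        · exfalso
          have hl : (ci.take k).length = k := List.length_take_of_le h2
          rw [hEq] at hl
          exact hrow ⟨by rw [← hEq]; exact List.take_prefix _ _, by omega⟩
        · exact ⟨k, h1, h2, hMem⟩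
      have hstep : cmeLoop ci (row :: rest) ri (m : Int) mmi = cmeLoop ci rest (ri + 1) (m : Int) mmi := by
        simp only [cmeLoop]
        by_cases g : ci.length ≥ row.length
        · rw [if_pos g]
          have hcond : ¬ (row.length = cmeCount ci row 0 ∧ ((cmeCount ci row 0 : Int)) > (m : Int)) := by
            rintro ⟨h1, h2⟩
            have hpre : row <+: ci := by
              have := (cmeCount_iff ci row 0 (by simpa using g)).mp h1.symm
              simpa using this
            have hlen : m < row.length := by
              have : ((row.length : Int)) > (m : Int) := by rw [h1]; exact h2
              exact_mod_cast this
            exact hrow ⟨hpre, hlen⟩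
          rw [if_neg hcond]
        · rw [if_neg g]
      rw [hstep, ih (ri + 1) m mmi Hrest]
      have hGne : cmeG ci rest m ≠ 0 := by
        obtain ⟨k, h1, h2, h3⟩ := Hrest
        have : k ≤ cmeG ci rest m := Nat.le_findGreatest h2 ⟨h1, h3⟩
        omega
      have hPG : m < cmeG ci rest m ∧ ci.take (cmeG ci rest m) ∈ rest :=
        Nat.findGreatest_of_ne_zero rfl hGne
      have hGle : cmeG ci rest m ≤ ci.length := Nat.findGreatest_le ci.length
      have hGfull : cmeG ci (row :: rest) m = cmeG ci rest m := by
        apply fg_eq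
        · exact ⟨hPG.1, List.mem_cons_of_mem _ hPG.2⟩
        · exact hGle
        · rintro k hk1 hk2 ⟨hk3, hk4⟩
          rcases List.mem_cons.mp hk4 with hEq | hMem
          · have hl : (ci.take k).length = k := List.length_take_of_le hk2
            rw [hEq] at hl
            exact hrow ⟨by rw [← hEq]; exact List.take_prefix _ _, by omega⟩
          · exact Nat.findGreatest_is_greatest (show cmeG ci rest m < k by omega) hk2 ⟨hk3, hMem⟩
      rw [hGfull]
      have hne : (row == ci.take (cmeG ci rest m)) = false := by
        rw [beq_eq_false_iff_ne]
        intro hEq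
        exact hrow ⟨by rw [hEq]; exact List.take_prefix _ _,
          by rw [hEq, List.length_take_of_le hGle]; exact hPG.1⟩
      rw [List.findIdx_cons, hne]
      simp only [cond_false]
      push_cast
      ring

-- the dict built by B maps each key to the index of its first occurrence
lemma cmeBuild_get? (key : List Int) : ∀ (mp : List (List Int)) (i : Nat) (d : PySem.Dict (List Int) Int),
    (cmeBuild mp i d).get? key =
      match d.get? key with
      | some v => some v
      | none => if key ∈ mp then some (((i + mp.findIdx (· == key)) : Nat) : Int) else none := by
  intro mp
  induction mp with
  | nil =>
    intro i d
    simp only [cmeBuild, List.not_mem_nil, if_false]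
    cases d.get? key <;> rfl
  | cons row rest ih =>
    intro i d
    simp only [cmeBuild]
    rcases hk : d.get? key with _ | v
    · by_cases hEq : key = row
      · subst hEq
        rw [show (if (d.get? key).isSome then d else d.insert key (i : Int)) = d.insert key (i : Int)
          from by rw [hk]; rfl]
        rw [ih (i + 1) (d.insert key (i : Int))]
        rw [PySem.Dict.get?_insert_self]
        simp [List.findIdx_cons]
      · have hd' : ∀ d' : PySem.Dict (List Int) Int,
            d' = (if (d.get? row).isSome then d else d.insert row (i : Int)) → d'.get? key = none := by
          intro d' hdd
          rcases hr : d.get? row with _ | w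
          · rw [hdd, hr]
            simp only [Option.isSome_none, Bool.false_eq_true, if_false]
            rw [PySem.Dict.get?_insert_of_ne _ _ hEq, hk]
          · rw [hdd, hr]
            simpa using hk
        rw [ih (i + 1) _, hd' _ rfl]
        have hfind : (row :: rest).findIdx (· == key) = rest.findIdx (· == key) + 1 := by
          rw [List.findIdx_cons, show (row == key) = false from beq_eq_false_iff_ne.mpr (Ne.symm hEq)]
          simp
        by_cases hm : key ∈ rest
        · rw [if_pos hm, if_pos (List.mem_cons_of_mem _ hm), hfind]
          simp only [Option.some.injEq, Nat.cast_inj]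
          omega
        · rw [if_neg hm, if_neg (by simp [hEq, hm])]
    · have hd' : (if (d.get? row).isSome then d else d.insert row (i : Int)).get? key = some v := by
        rcases hr : d.get? row with _ | w
        · simp only [Option.isSome_none, Bool.false_eq_true, if_false]
          rw [PySem.Dict.get?_insert_of_ne _ _ (by rintro rfl; rw [hk] at hr; simp at hr), hk]
        · simpa [hr] using hk
      rw [ih (i + 1) _, hd']

-- probing lengths none of which is a candidate gives -1
lemma cmeProbe_neg (ci : List Int) (mp : List (List Int)) (d : PySem.Dict (List Int) Int)
    (hd : ∀ key, d.get? key = if key ∈ mp then some ((mp.findIdx (· == key) : Nat) : Int) else none)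
    (n : Nat) : ∀ lens : List Nat, (∀ k ∈ lens, 0 < k → k ≤ n → ci.take k ∉ mp) →
    cmeProbe d ci n lens = -1 := by
  intro lens
  induction lens with
  | nil => intro _; simp [cmeProbe]
  | cons k rest ih =>
    intro h
    simp only [cmeProbe]
    by_cases hg : 0 < k ∧ k ≤ n
    · rw [if_pos hg, hd, if_neg (h k List.mem_cons_self hg.1 hg.2)]
      exact ih (fun k' hk' => h k' (List.mem_cons_of_mem _ hk'))
    · rw [if_neg hg]
      exact ih (fun k' hk' => h k' (List.mem_cons_of_mem _ hk'))

-- probing a strictly descending length list containing the longest candidate G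
-- (with no candidate exceeding G) returns the first-occurrence index of ci.take G
lemma cmeProbe_pos (ci : List Int) (mp : List (List Int)) (d : PySem.Dict (List Int) Int)
    (hd : ∀ key, d.get? key = if key ∈ mp then some ((mp.findIdx (· == key) : Nat) : Int) else none)
    (n : Nat) (G : Nat) (hcand : 0 < G ∧ G ≤ n ∧ ci.take G ∈ mp)
    (hmax : ∀ k, 0 < k → k ≤ n → ci.take k ∈ mp → k ≤ G) :
    ∀ lens : List Nat, lens.Pairwise (· > ·) → G ∈ lens →
    cmeProbe d ci n lens = ((mp.findIdx (· == ci.take G) : Nat) : Int) := by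
  intro lens
  induction lens with
  | nil => intro _ hG; simp at hG
  | cons k rest ih =>
    intro hpw hG
    have hall := List.pairwise_cons.mp hpw
    simp only [cmeProbe]
    by_cases hk : k = G
    · subst hk
      rw [if_pos ⟨hcand.1, hcand.2.1⟩, hd, if_pos hcand.2.2]
    · have hGr : G ∈ rest := by
        rcases List.mem_cons.mp hG with h | h
        · exact absurd h.symm hk
        · exact h
      have hkG : G < k := hall.1 G hGr
      have hrec := ih hall.2 hGr
      by_cases hg : 0 < k ∧ k ≤ n
      · rw [if_pos hg, hd, if_neg (fun hmem => by have := hmax k hg.1 hg.2 hmem; omega)]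
        exact hrec
      · rw [if_neg hg]
        exact hrec

-- ===== VERDICT (by name: the statement is the Claim_ definition above) =====
theorem check_matching_elements_spec : Claim_equal_check_matching_elements := by
  intro mp ci _
  unfold Spec_check_matching_elements check_matching_elements check_matching_elements_alt
  have hd : ∀ key, (cmeBuild mp 0 PySem.Dict.empty).get? key =
      if key ∈ mp then some ((mp.findIdx (· == key) : Nat) : Int) else none := by
    intro key
    rw [cmeBuild_get? key mp 0 PySem.Dict.empty, PySem.Dict.get?_empty]
    simp
  have hpw : (cmeLens mp).Pairwise (· > ·) := by
    have h1 : (cmeLens mp).Pairwise (fun a b => b ≤ a) :=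
      PySem.List.sorted_pairwise_rev (PySem.Set.ofList (mp.map List.length)) (fun x => x)
    have h2 : (cmeLens mp).Nodup :=
      ((PySem.List.sorted_perm (PySem.Set.ofList (mp.map List.length)) (fun x => x) true).nodup_iff).mpr
        (PySem.Set.nodup_ofList _)
    exact (h1.and h2).imp (fun h => h.1.lt_of_ne (fun hba => h.2 hba.symm))
  by_cases H : ∃ k, 0 < k ∧ k ≤ ci.length ∧ ci.take k ∈ mp
  · have hGne : Nat.findGreatest (fun k => 0 < k ∧ ci.take k ∈ mp) ci.length ≠ 0 := by
      obtain ⟨k, h1, h2, h3⟩ := H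
      have : k ≤ Nat.findGreatest (fun k => 0 < k ∧ ci.take k ∈ mp) ci.length :=
        Nat.le_findGreatest h2 ⟨h1, h3⟩
      omega
    have hPG : 0 < Nat.findGreatest (fun k => 0 < k ∧ ci.take k ∈ mp) ci.length ∧
        ci.take (Nat.findGreatest (fun k => 0 < k ∧ ci.take k ∈ mp) ci.length) ∈ mp :=
      Nat.findGreatest_of_ne_zero rfl hGne
    have hGle : Nat.findGreatest (fun k => 0 < k ∧ ci.take k ∈ mp) ci.length ≤ ci.length :=
      Nat.findGreatest_le ci.length
    have hGmem : Nat.findGreatest (fun k => 0 < k ∧ ci.take k ∈ mp) ci.length ∈ cmeLens mp := by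
      rw [cmeLens, PySem.List.mem_sorted, PySem.Set.mem_ofList]
      refine List.mem_map.mpr ⟨_, hPG.2, ?_⟩
      exact List.length_take_of_le hGle
    rw [cmeProbe_pos ci mp _ hd ci.length _ ⟨hPG.1, hGle, hPG.2⟩
      (fun k h1 h2 h3 => Nat.le_findGreatest h2 ⟨h1, h3⟩) (cmeLens mp) hpw hGmem]
    have := cmeLoop_pos ci mp 0 0 (-1) (by simpa using H)
    simp only [Nat.cast_zero, zero_add] at this
    rw [this]
  · rw [cmeProbe_neg ci mp _ hd ci.length (cmeLens mp)
      (by push Not at H; exact fun k _ h1 h2 => H k h1 h2)]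
    have := cmeLoop_neg ci mp 0 0 (-1) (by push Not at H; exact fun k h1 h2 => H k h1 h2)
    simpa using this
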